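-- pv_equiv track=rewrite | github.com/gyeomh/LEGO-EVAL | evaluation/functions.py | get_window_list
-- ===== SOURCE A (Python) =====
-- def get_window_list(scene: dict, room_list, sys_args) -> dict:
--     """
--     Returns a list of window IDs from the given scene.
--     """
--     output = {}
--     for room in room_list:
--         output[room] = []
--     for window in scene.get("windows", []):
--         if window["roomId"] in room_list:
--             if 'exterior' not in window["roomId"]:
--                 output[window["roomId"]].append(window["id"])
--
--     return output
-- ===== SOURCE B (Python) =====
-- def get_window_list(scene: dict, room_list, sys_args) -> dict:
--     """
--     Returns a list of window IDs from the given scene.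
--     """
--     # one pass: group every window (as a dict) under its roomId
--     by_room = {}
--     for window in scene.get("windows", []):
--         by_room.setdefault(window["roomId"], []).append(window)
--     # project onto room_list: exterior rooms stay empty
--     return {room: ([] if 'exterior' in room else [w["id"] for w in by_room.get(room, [])])
--             for room in room_list}
-- ===== Notes on version B (the rewrite author's own statement) =====
-- stated objective: idiomatic
-- what changed: B replaces A's pre-initialize-then-live-append loop (with a linear room_list membership test per window) by a group-by-roomId dict built in one unfiltered pass plus a dict comprehension projecting room_list (exterior rooms empty, others looked up).
import Mathlib
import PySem

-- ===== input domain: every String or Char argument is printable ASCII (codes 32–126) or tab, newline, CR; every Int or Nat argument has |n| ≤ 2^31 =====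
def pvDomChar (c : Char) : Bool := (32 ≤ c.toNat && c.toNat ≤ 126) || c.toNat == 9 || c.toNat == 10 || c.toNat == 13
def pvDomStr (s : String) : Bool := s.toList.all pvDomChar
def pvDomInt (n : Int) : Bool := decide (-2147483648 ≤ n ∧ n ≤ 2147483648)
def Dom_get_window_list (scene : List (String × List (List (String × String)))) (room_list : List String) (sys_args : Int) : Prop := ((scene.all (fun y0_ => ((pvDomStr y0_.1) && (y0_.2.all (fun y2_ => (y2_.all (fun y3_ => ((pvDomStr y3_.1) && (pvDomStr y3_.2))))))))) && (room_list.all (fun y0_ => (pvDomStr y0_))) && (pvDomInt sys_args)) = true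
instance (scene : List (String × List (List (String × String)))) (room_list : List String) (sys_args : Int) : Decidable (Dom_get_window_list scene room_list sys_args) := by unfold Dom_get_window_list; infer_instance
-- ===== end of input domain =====

-- B replaces A's pre-initialize-then-live-append loop by a group-by-roomId index built in one
-- unfiltered pass plus a projection over room_list (exterior rooms empty); return values proved equal.

-- shared helper: first-match lookup in a Python dict given as an association list (d[k] / d.get(k))
def pyLookup? {ν : Type} (d : List (String × ν)) (k : String) : Option ν :=
  (d.find? (fun p => p.1 == k)).map (·.2)

-- ===== PORT A =====
def get_window_list (scene : List (String × List (List (String × String)))) (room_list : List String) (sys_args : Int) : List (String × List String) :=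
  -- output = {}; for room in room_list: output[room] = []
  let output0 : PySem.Dict String (List String) :=
    room_list.foldl (fun d room => d.insert room []) PySem.Dict.empty
  -- for window in scene.get("windows", []): …
  let windows := (pyLookup? scene "windows").getD []
  (windows.foldl (fun d w =>
      match pyLookup? w "roomId" with
      | none => d                    -- window["roomId"]: KeyError, excluded by Pre_
      | some rid =>
        if room_list.contains rid then
          if PySem.Str.isIn "exterior" rid then d
          else
            match pyLookup? w "id" with
            | none => d              -- window["id"]: KeyError, excluded by Pre_
            | some i => d.modify rid [] (fun l => l ++ [i])  -- output[rid].append(…); rid is a key of output here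
        else d) output0).items

-- ===== PORT B =====
def get_window_list_alt (scene : List (String × List (List (String × String)))) (room_list : List String) (sys_args : Int) : List (String × List String) :=
  -- by_room = {}; for window in scene.get("windows", []): by_room.setdefault(window["roomId"], []).append(window)
  let windows := (pyLookup? scene "windows").getD []
  let byRoom : PySem.Dict String (List (List (String × String))) :=
    windows.foldl (fun g w =>
      match pyLookup? w "roomId" with
      | none => g                    -- window["roomId"]: KeyError, excluded by Pre_
      | some rid => g.modify rid [] (fun l => l ++ [w])) PySem.Dict.empty  -- setdefault(…,[]).append(w)
  -- {room: ([] if 'exterior' in room else [w["id"] for w in by_room.get(room, [])]) for room in room_list}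
  (room_list.foldl (fun out room =>
      out.insert room
        (if PySem.Str.isIn "exterior" room then []
         else (byRoom.getD room []).map (fun w => (pyLookup? w "id").getD "")))  -- w["id"]: present under Pre_
    PySem.Dict.empty).items

-- ===== PRECONDITION & SPEC =====
-- Pre_ excludes exactly the inputs where A raises KeyError: a window without a "roomId" key, or a
-- window whose roomId is a non-exterior member of room_list but which lacks an "id" key.
def Pre_get_window_list (scene : List (String × List (List (String × String)))) (room_list : List String) (sys_args : Int) : Prop :=
  ∀ w ∈ (pyLookup? scene "windows").getD [],
    (pyLookup? w "roomId").isSome = true ∧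
    (∀ rid, pyLookup? w "roomId" = some rid →
      room_list.contains rid = true → PySem.Str.isIn "exterior" rid = false →
      (pyLookup? w "id").isSome = true)
instance (scene : List (String × List (List (String × String)))) (room_list : List String) (sys_args : Int) : Decidable (Pre_get_window_list scene room_list sys_args) := by unfold Pre_get_window_list; infer_instance

def pvWitness_get_window_list : (List (String × List (List (String × String)))) × List String × Int :=
  ([("windows", [[("roomId", "kitchen"), ("id", "w1")], [("roomId", "hall"), ("id", "w2")], [("roomId", "kitchen"), ("id", "w3")]])],
   ["kitchen", "exterior1", "hall"], 0)

def Spec_get_window_list (scene : List (String × List (List (String × String)))) (room_list : List String) (sys_args : Int) (out : List (String × List String)) : Prop := out = get_window_list_alt scene room_list sys_args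
instance (scene : List (String × List (List (String × String)))) (room_list : List String) (sys_args : Int) (out : List (String × List String)) : Decidable (Spec_get_window_list scene room_list sys_args out) := by unfold Spec_get_window_list; infer_instance

-- ===== CLAIM (what is proved, stated in full; the proofs are below) =====
def Claim_equal_get_window_list : Prop := ∀ (scene : List (String × List (List (String × String)))) (room_list : List String) (sys_args : Int), Dom_get_window_list scene room_list sys_args → Pre_get_window_list scene room_list sys_args → Spec_get_window_list scene room_list sys_args (get_window_list scene room_list sys_args)

-- ===== LEMMAS AND PROOFS =====

-- keys of A's window loop: every modify hits an existing key, so the key list is untouched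
theorem pvA_keys (room_list : List String) (ws : List (List (String × String))) (d : PySem.Dict String (List String))
    (hd : ∀ rid, room_list.contains rid = true → d.contains rid = true) :
    (ws.foldl (fun d w =>
      match pyLookup? w "roomId" with
      | none => d
      | some rid =>
        if room_list.contains rid then
          if PySem.Str.isIn "exterior" rid then d
          else
            match pyLookup? w "id" with
            | none => d
            | some i => d.modify rid [] (fun l => l ++ [i])
        else d) d).keys = d.keys := by
  induction ws generalizing d with
  | nil => rfl
  | cons w ws ih =>
    simp only [List.foldl_cons]
    cases hrid : pyLookup? w "roomId" with
    | none => exact ih d hd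
    | some rid =>
      by_cases hc : room_list.contains rid = true
      · simp only [hc, if_true]
        by_cases he : PySem.Str.isIn "exterior" rid = true
        · simp only [he, if_true]; exact ih d hd
        · simp only [Bool.not_eq_true] at he; simp only [he, Bool.false_eq_true, if_false]
          cases hid : pyLookup? w "id" with
          | none => exact ih d hd
          | some i =>
            have hkeys : (d.modify rid [] (fun l => l ++ [i])).keys = d.keys := by
              rw [PySem.Dict.keys_modify]
              exact PySem.Dict.keys_insert_of_contains d _ (hd rid hc)
            have hd' : ∀ r, room_list.contains r = true → (d.modify rid [] (fun l => l ++ [i])).contains r = true := by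
              intro r hr
              rw [PySem.Dict.contains_iff_mem_keys, hkeys, ← PySem.Dict.contains_iff_mem_keys]
              exact hd r hr
            rw [ih _ hd', hkeys]
      · simp only [Bool.not_eq_true] at hc; simp only [hc, Bool.false_eq_true, if_false]
        exact ih d hd

-- value at key r after A's window loop: the ids its branches append at r, in window order
theorem pvA_getD (room_list : List String) (ws : List (List (String × String))) (d : PySem.Dict String (List String)) (r : String) :
    (ws.foldl (fun d w =>
      match pyLookup? w "roomId" with
      | none => d
      | some rid =>
        if room_list.contains rid then
          if PySem.Str.isIn "exterior" rid then d
          else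
            match pyLookup? w "id" with
            | none => d
            | some i => d.modify rid [] (fun l => l ++ [i])
        else d) d).getD r []
    = d.getD r [] ++ ws.flatMap (fun w =>
      match pyLookup? w "roomId" with
      | none => []
      | some rid =>
        if room_list.contains rid then
          if PySem.Str.isIn "exterior" rid then []
          else
            match pyLookup? w "id" with
            | none => []
            | some i => if r = rid then [i] else []
        else []) := by
  induction ws generalizing d with
  | nil => simp
  | cons w ws ih =>
    simp only [List.foldl_cons, List.flatMap_cons]
    cases hrid : pyLookup? w "roomId" with
    | none => simp only [hrid]; rw [ih]; simp
    | some rid =>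
      simp only [hrid]
      by_cases hc : room_list.contains rid = true
      · simp only [hc, if_true]
        by_cases he : PySem.Str.isIn "exterior" rid = true
        · simp only [he, if_true]; rw [ih]; simp
        · simp only [Bool.not_eq_true] at he; simp only [he, Bool.false_eq_true, if_false]
          cases hid : pyLookup? w "id" with
          | none => simp only [hid]; rw [ih]; simp
          | some i =>
            simp only [hid]
            rw [ih, PySem.Dict.getD_modify]
            by_cases hr : r = rid
            · subst hr; simp
            · simp [hr]
      · simp only [Bool.not_eq_true] at hc
        simp only [hc, Bool.false_eq_true, if_false]; rw [ih]; simp [hc]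

-- value at key r of B's grouping loop: the windows whose roomId is r, in order
theorem pvB_getD (ws : List (List (String × String))) (g : PySem.Dict String (List (List (String × String)))) (r : String) :
    (ws.foldl (fun g w =>
      match pyLookup? w "roomId" with
      | none => g
      | some rid => g.modify rid [] (fun l => l ++ [w])) g).getD r []
    = g.getD r [] ++ ws.flatMap (fun w =>
      match pyLookup? w "roomId" with
      | none => []
      | some rid => if r = rid then [w] else []) := by
  induction ws generalizing g with
  | nil => simp
  | cons w ws ih =>
    simp only [List.foldl_cons, List.flatMap_cons]
    cases hrid : pyLookup? w "roomId" with
    | none => simp only [hrid]; rw [ih]; simp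
    | some rid =>
      simp only [hrid]
      rw [ih, PySem.Dict.getD_modify]
      by_cases hr : r = rid
      · subst hr; simp
      · simp [hr]

-- value at key r of a fold of inserts whose value depends only on the key
theorem pvInsertFold_getD (l : List String) (val : String → List String) (d : PySem.Dict String (List String)) (r : String) :
    (l.foldl (fun d k => d.insert k (val k)) d).getD r []
    = if l.contains r then val r else d.getD r [] := by
  induction l generalizing d with
  | nil => simp
  | cons k l ih =>
    simp only [List.foldl_cons, List.contains_cons, ih, PySem.Dict.getD_insert]
    by_cases hk : r = k
    · subst hk; simp
    · have : (k == r) = false := by simp [Ne.symm hk]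
      simp [hk, this]


-- pointwise: for an exterior room r, A's branches never append at r
theorem pvStep_ext (room_list : List String) (r : String) (he : PySem.Str.isIn "exterior" r = true)
    (w : List (String × String)) :
    (match pyLookup? w "roomId" with
      | none => []
      | some rid =>
        if room_list.contains rid then
          if PySem.Str.isIn "exterior" rid then []
          else
            match pyLookup? w "id" with
            | none => []
            | some i => if r = rid then [i] else []
        else []) = ([] : List String) := by
  cases hrid : pyLookup? w "roomId" with
  | none => rfl
  | some rid =>
    by_cases hc : room_list.contains rid = true
    · by_cases he' : PySem.Str.isIn "exterior" rid = true
      · simp only [hc, he', reduceIte]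
      · simp only [Bool.not_eq_true] at he'
        cases hid : pyLookup? w "id" with
        | none => simp only [hc, he', Bool.false_eq_true, reduceIte]
        | some i =>
          have hrr : r ≠ rid := fun h => (by rw [h] at he; rw [he] at he'; exact absurd he' (by simp))
          simp only [hc, he', Bool.false_eq_true, hrr, reduceIte]
    · simp only [Bool.not_eq_true] at hc
      simp only [hc, Bool.false_eq_true, reduceIte]

-- pointwise: for a non-exterior room r of room_list, A appends at r exactly the id of each window grouped under r
theorem pvStep_main (room_list : List String) (r : String) (hrc : room_list.contains r = true)
    (he : PySem.Str.isIn "exterior" r = false) (w : List (String × String))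
    (hsome : (pyLookup? w "roomId").isSome = true)
    (hid : ∀ rid, pyLookup? w "roomId" = some rid → room_list.contains rid = true →
      PySem.Str.isIn "exterior" rid = false → (pyLookup? w "id").isSome = true) :
    (match pyLookup? w "roomId" with
      | none => []
      | some rid =>
        if room_list.contains rid then
          if PySem.Str.isIn "exterior" rid then []
          else
            match pyLookup? w "id" with
            | none => []
            | some i => if r = rid then [i] else []
        else [])
    = (match pyLookup? w "roomId" with
      | none => []
      | some rid => if r = rid then [w] else []).map (fun w => (pyLookup? w "id").getD "") := by
  cases hrid : pyLookup? w "roomId" with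
  | none => rw [hrid] at hsome; simp at hsome
  | some rid =>
    by_cases hrr : r = rid
    · subst hrr
      have hs := hid r hrid hrc he
      cases hidv : pyLookup? w "id" with
      | none => rw [hidv] at hs; simp at hs
      | some i =>
        simp only [hrc, he, Bool.false_eq_true, reduceIte, hidv, List.map_cons, List.map_nil]
        simp
    · by_cases hc : room_list.contains rid = true
      · by_cases he' : PySem.Str.isIn "exterior" rid = true
        · simp only [hc, he', reduceIte, hrr]
          simp [hrr]
        · simp only [Bool.not_eq_true] at he'
          cases hidv : pyLookup? w "id" with
          | none => simp only [hc, he', Bool.false_eq_true, reduceIte]; simp [hrr]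
          | some i => simp only [hc, he', Bool.false_eq_true, reduceIte]; simp [hrr]
      · simp only [Bool.not_eq_true] at hc
        simp only [hc, Bool.false_eq_true, reduceIte]
        simp [hrr]

-- ===== VERDICT (by name: the statement is the Claim_ definition above) =====
theorem get_window_list_spec : Claim_equal_get_window_list := by
  intro scene room_list sys_args _hdom hpre
  unfold Spec_get_window_list get_window_list get_window_list_alt
  set ws := (pyLookup? scene "windows").getD [] with hws
  -- key lists of both final dicts
  have hAkeys0 : (room_list.foldl (fun d room => d.insert room ([] : List String)) PySem.Dict.empty).keys
      = PySem.Set.ofList room_list := by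
    rw [PySem.Dict.keys_foldl_insert room_list (fun _ _ => []) _, PySem.Dict.keys_empty]; rfl
  have hA0contains : ∀ rid, room_list.contains rid = true →
      (room_list.foldl (fun d room => d.insert room ([] : List String)) PySem.Dict.empty).contains rid = true := by
    intro rid h
    rw [PySem.Dict.contains_iff_mem_keys, hAkeys0]
    exact (PySem.Set.mem_ofList room_list rid).mpr (List.contains_iff_mem.mp h)
  have hAkeys := pvA_keys room_list ws _ hA0contains
  rw [hAkeys0] at hAkeys
  have hBkeys : (room_list.foldl (fun out room =>
      out.insert room
        (if PySem.Str.isIn "exterior" room then []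
         else ((ws.foldl (fun g w =>
            match pyLookup? w "roomId" with
            | none => g
            | some rid => g.modify rid [] (fun l => l ++ [w])) PySem.Dict.empty).getD room []).map
              (fun w => (pyLookup? w "id").getD ""))) PySem.Dict.empty).keys
      = PySem.Set.ofList room_list := by
    rw [PySem.Dict.keys_foldl_insert room_list
      (f := fun _ room => (if PySem.Str.isIn "exterior" room then []
         else ((ws.foldl (fun g w =>
            match pyLookup? w "roomId" with
            | none => g
            | some rid => g.modify rid [] (fun l => l ++ [w])) PySem.Dict.empty).getD room []).map
              (fun w => (pyLookup? w "id").getD ""))) _, PySem.Dict.keys_empty]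
    rfl
  have hnodup := PySem.Set.nodup_ofList room_list
  rw [PySem.Dict.items_eq_map_keys _ (by rw [hAkeys]; exact hnodup) [],
      PySem.Dict.items_eq_map_keys _ (by rw [hBkeys]; exact hnodup) [],
      hAkeys, hBkeys]
  apply List.map_congr_left
  intro r hr
  have hrl : r ∈ room_list := (PySem.Set.mem_ofList room_list r).mp hr
  have hrc : room_list.contains r = true := List.contains_iff_mem.mpr hrl
  -- reduce both sides to the flatMap characterisations
  rw [pvA_getD, pvInsertFold_getD, pvInsertFold_getD, pvB_getD]
  simp only [hrc, reduceIte, PySem.Dict.getD_empty, List.nil_append]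
  by_cases he : PySem.Str.isIn "exterior" r = true
  · simp only [he, reduceIte]
    exact congrArg _ (List.flatMap_eq_nil_iff.mpr (fun w _ => pvStep_ext room_list r he w))
  · simp only [Bool.not_eq_true] at he
    simp only [he, Bool.false_eq_true, reduceIte, List.map_flatMap]
    refine congrArg _ (List.flatMap_congr ?_)
    intro w hw
    obtain ⟨hsome, hid⟩ := hpre w hw
    exact pvStep_main room_list r hrc he w hsome hid
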